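-- pv_equiv track=rewrite | github.com/nolan11701/cs100 | week6/1.an_array_number.py | get_array_numerd
-- ===== SOURCE A (Python) =====
-- def get_array_numerd(b, t):
--     g = []
--     if t in b:
--         for i in range(len(b)):
--             if b[i] != t:
--                 g.append(b[i])
--
--     else:
--         g = b + [t]
--
--     g.sort()
--     return g
-- ===== SOURCE B (Python) =====
-- def _insort(s, x):
--     # bisect_right by hand, then insert (mutates the local sorted list s)
--     lo, hi = 0, len(s)
--     while lo < hi:
--         mid = (lo + hi) // 2
--         if s[mid] <= x:
--             lo = mid + 1
--         else:
--             hi = mid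
--     s.insert(lo, x)
--
--
-- def get_array_numerd(b, t):
--     out = []          # kept sorted at all times
--     seen = False
--     for x in b:
--         if x == t:
--             seen = True
--         else:
--             _insort(out, x)
--     if not seen:
--         _insort(out, t)
--     return out
-- ===== Notes on version B (the rewrite author's own statement) =====
-- stated objective: alternative
-- what changed: B never calls sort: it keeps its accumulator sorted at all times, placing each element (skipping t) with a hand-written bisect_right binary search plus insert, with a flag remembering whether t occurred so t is inserted at the end if absent, instead of A's membership test, collect loop and final sort.
import Mathlib
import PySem

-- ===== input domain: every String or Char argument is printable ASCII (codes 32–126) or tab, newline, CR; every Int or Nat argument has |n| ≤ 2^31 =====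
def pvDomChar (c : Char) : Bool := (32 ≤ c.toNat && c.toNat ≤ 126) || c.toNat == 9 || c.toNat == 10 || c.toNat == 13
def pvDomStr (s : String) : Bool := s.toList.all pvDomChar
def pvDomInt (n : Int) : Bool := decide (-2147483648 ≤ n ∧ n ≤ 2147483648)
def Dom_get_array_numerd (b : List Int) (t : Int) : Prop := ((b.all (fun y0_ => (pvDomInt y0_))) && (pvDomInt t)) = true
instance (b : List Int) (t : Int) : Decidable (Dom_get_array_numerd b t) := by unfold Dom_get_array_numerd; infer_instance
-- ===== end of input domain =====

-- B never calls sort: it keeps its accumulator sorted at all times, inserting each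
-- element (skipping t) at its bisect_right position, with a flag so t is inserted at
-- the end if absent; B mutates only its own local list, the arguments are untouched.
-- ===== PORT A =====
def get_array_numerd (b : List Int) (t : Int) : List Int :=
  let g : List Int := []
  let g :=
    if t ∈ b then
      (PySem.List.pyRange 0 b.length 1).foldl
        (fun g i => if PySem.List.pyGetD b i 0 ≠ t then g ++ [PySem.List.pyGetD b i 0] else g) g
    else b ++ [t]
  PySem.List.sorted g (fun x => x) false

-- ===== PORT B =====
-- _insort: hand-written bisect_right then insert; ported with the PySem primitives
-- (B mutates only its local accumulator; rendered functionally here)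
def pvInsort (s : List Int) (x : Int) : List Int :=
  PySem.List.insert s ((PySem.List.bisectRight s x : Nat) : Int) x

def get_array_numerd_alt (b : List Int) (t : Int) : List Int :=
  let st := b.foldl
    (fun (st : List Int × Bool) x =>
      if x = t then (st.1, true) else (pvInsort st.1 x, st.2))
    ([], false)
  if !st.2 then pvInsort st.1 t else st.1

-- ===== PRECONDITION & SPEC =====
def Spec_get_array_numerd (b : List Int) (t : Int) (out : List Int) : Prop := out = get_array_numerd_alt b t
instance (b : List Int) (t : Int) (out : List Int) : Decidable (Spec_get_array_numerd b t out) := by unfold Spec_get_array_numerd; infer_instance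

-- ===== CLAIM =====
def Claim_equal_get_array_numerd : Prop := ∀ (b : List Int) (t : Int), Dom_get_array_numerd b t → Spec_get_array_numerd b t (get_array_numerd b t)

-- ===== LEMMAS AND PROOFS =====

-- A's index loop is a filter keeping elements ≠ t.
lemma loopA_eq_filter (b : List Int) (t : Int) :
    (PySem.List.pyRange 0 b.length 1).foldl
      (fun g i => if PySem.List.pyGetD b i 0 ≠ t then g ++ [PySem.List.pyGetD b i 0] else g) [] =
    b.filter (fun x => x ≠ t) := by
  rw [show ((b.length : Int)) = PySem.List.len b from rfl,
      PySem.List.foldl_pyRange_zero_pyGetD b 0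
        (fun acc x => if x ≠ t then acc ++ [x] else acc) []]
  have := PySem.List.foldl_append_if (fun x => decide (x ≠ t)) (fun x : Int => x) b []
  simp only [decide_eq_true_eq, List.map_id'] at this
  simpa using this

lemma pvInsort_perm (s : List Int) (x : Int) (hs : s.Pairwise (· ≤ ·)) :
    (pvInsort s x).Perm (x :: s) := by
  obtain ⟨hle, -, -⟩ := PySem.List.bisectRight_spec s x hs
  rw [pvInsort, PySem.List.insert_natCast s _ x hle]
  simpa [List.take_append_drop] using
    (List.perm_middle (a := x) (l₁ := s.take (PySem.List.bisectRight s x))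
      (l₂ := s.drop (PySem.List.bisectRight s x)))

lemma pvInsort_sorted (s : List Int) (x : Int) (hs : s.Pairwise (· ≤ ·)) :
    (pvInsort s x).Pairwise (· ≤ ·) := by
  obtain ⟨hle, hpre, hpost⟩ := PySem.List.bisectRight_spec s x hs
  rw [pvInsort, PySem.List.insert_natCast s _ x hle]
  set k := PySem.List.bisectRight s x with hk
  refine List.pairwise_append.mpr ⟨hs.sublist (List.take_sublist k s), ?_, ?_⟩
  · refine List.pairwise_cons.mpr ⟨?_, hs.sublist (List.drop_sublist k s)⟩
    intro b hb
    obtain ⟨i, hi, rfl⟩ := List.mem_iff_getElem.mp hb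
    rw [List.getElem_drop]
    exact le_of_lt (hpost (k + i) (by simp at hi; omega) (Nat.le_add_right k i))
  · intro a ha c hc
    obtain ⟨i, hi, rfl⟩ := List.mem_iff_getElem.mp ha
    have hik : i < k := lt_of_lt_of_le hi (by simp)
    rw [List.getElem_take]
    have hax : s[i]'(by simp at hi; omega) ≤ x := hpre i (by simp at hi; omega) hik
    rcases List.mem_cons.mp hc with rfl | hcd
    · exact hax
    · obtain ⟨j, hj, rfl⟩ := List.mem_iff_getElem.mp hcd
      rw [List.getElem_drop]
      exact le_trans hax
        (le_of_lt (hpost (k + j) (by simp at hj; omega) (Nat.le_add_right k j)))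

-- Invariant of B's loop: the accumulator stays sorted, is a permutation of the
-- filtered input appended to the start state, and the flag records membership of t.
lemma loopB_inv (t : Int) (b : List Int) : ∀ (out : List Int) (seen : Bool),
    out.Pairwise (· ≤ ·) →
    ((b.foldl (fun (st : List Int × Bool) x =>
        if x = t then (st.1, true) else (pvInsort st.1 x, st.2)) (out, seen)).1.Pairwise (· ≤ ·)) ∧
    ((b.foldl (fun (st : List Int × Bool) x =>
        if x = t then (st.1, true) else (pvInsort st.1 x, st.2)) (out, seen)).1.Perm
      (out ++ b.filter (fun x => x ≠ t))) ∧
    ((b.foldl (fun (st : List Int × Bool) x =>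
        if x = t then (st.1, true) else (pvInsort st.1 x, st.2)) (out, seen)).2
      = (seen || decide (t ∈ b))) := by
  induction b with
  | nil => intro out seen h; simpa using h
  | cons x xs ih =>
    intro out seen h
    simp only [List.foldl_cons]
    by_cases hx : x = t
    · subst hx
      rw [if_pos rfl]
      obtain ⟨h1, h2, h3⟩ := ih out true h
      refine ⟨h1, ?_, ?_⟩
      · simpa using h2
      · simp [h3]
    · simp only [if_neg hx]
      obtain ⟨h1, h2, h3⟩ := ih (pvInsort out x) seen (pvInsort_sorted out x h)
      refine ⟨h1, ?_, ?_⟩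
      · have : (pvInsort out x ++ xs.filter (fun y => y ≠ t)).Perm
            (out ++ (x :: xs).filter (fun y => y ≠ t)) := by
          simp only [List.filter_cons, ne_eq, hx, not_false_iff, decide_true]
          exact (((pvInsort_perm out x h).append_right _).trans List.perm_middle.symm)
        exact h2.trans this
      · have : (t ∈ x :: xs) ↔ (t ∈ xs) := by
          constructor
          · intro hm; rcases List.mem_cons.mp hm with h' | h'
            · exact absurd h'.symm hx
            · exact h'
          · exact List.mem_cons_of_mem x
        rw [h3]; congr 1; simp [this]

-- ===== VERDICT =====
theorem get_array_numerd_spec : Claim_equal_get_array_numerd := by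
  intro b t _
  unfold Spec_get_array_numerd get_array_numerd get_array_numerd_alt
  obtain ⟨h1, h2, h3⟩ := loopB_inv t b [] false List.Pairwise.nil
  simp only [List.nil_append] at h1 h2 h3 ⊢
  set st := b.foldl
    (fun (st : List Int × Bool) x =>
      if x = t then (st.1, true) else (pvInsort st.1 x, st.2)) ([], false) with hst
  by_cases hm : t ∈ b
  · have hseen : st.2 = true := by rw [h3]; simp [hm]
    rw [if_pos hm, loopA_eq_filter, hseen]
    simpa using (PySem.List.sorted_id_eq_of_perm_of_pairwise _ _ h2 h1)
  · have hseen : st.2 = false := by rw [h3]; simp [hm]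
    have hf : b.filter (fun x => x ≠ t) = b :=
      List.filter_eq_self.mpr (fun x hx => by
        simp only [ne_eq, decide_eq_true_eq]
        intro he; exact hm (he ▸ hx))
    rw [hf] at h2
    rw [if_neg hm, hseen]
    have hp : (pvInsort st.1 t).Perm (b ++ [t]) :=
      (pvInsort_perm _ t h1).trans ((h2.cons t).trans (List.perm_append_singleton t b).symm)
    simpa using (PySem.List.sorted_id_eq_of_perm_of_pairwise _ _ hp (pvInsort_sorted _ t h1))
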